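-- pv_equiv track=rewrite | github.com/scrimshawlife-ctrl/Abraxas | abx/aalmanac_enrich.py | _find_concordance
-- ===== SOURCE A (Python) =====
-- from typing import Any, Dict, List
--
-- def _find_concordance(
--     term: str, text: str, window: int = 64, max_snips: int = 6
-- ) -> List[str]:
--     t = (term or "").strip()
--     if not t or not text:
--         return []
--     out = []
--     low = text.lower()
--     needle = t.lower()
--     start = 0
--     while len(out) < max_snips:
--         idx = low.find(needle, start)
--         if idx < 0:
--             break
--         a = max(0, idx - window)
--         b = min(len(text), idx + len(t) + window)
--         snip = text[a:b].replace("\n", " ").strip()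
--         out.append(snip)
--         start = idx + len(t)
--     return out
-- ===== SOURCE B (Python) =====
-- from typing import List
--
--
-- def _find_concordance(
--     term: str, text: str, window: int = 64, max_snips: int = 6
-- ) -> List[str]:
--     t = (term or "").strip()
--     if not t or not text:
--         return []
--     low = text.lower()
--     needle = t.lower()
--
--     def occs(start: int, remaining: int) -> List[int]:
--         # recursively collect up to `remaining` non-overlapping occurrence starts
--         if remaining <= 0:
--             return []
--         i = low.find(needle, start)
--         if i < 0:
--             return []
--         return [i] + occs(i + len(needle), remaining - 1)
--
--     return [
--         text[max(0, i - window): min(len(text), i + len(t) + window)]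
--         .replace("\n", " ")
--         .strip()
--         for i in occs(0, max_snips)
--     ]
-- ===== Notes on version B (the rewrite author's own statement) =====
-- stated objective: idiomatic
-- what changed: Splits A's single while-loop that finds occurrences and builds snippets inline with an accumulator into two stages: a recursive helper collecting the occurrence start indices, then a list comprehension mapping each index to its snippet.
import Mathlib
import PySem

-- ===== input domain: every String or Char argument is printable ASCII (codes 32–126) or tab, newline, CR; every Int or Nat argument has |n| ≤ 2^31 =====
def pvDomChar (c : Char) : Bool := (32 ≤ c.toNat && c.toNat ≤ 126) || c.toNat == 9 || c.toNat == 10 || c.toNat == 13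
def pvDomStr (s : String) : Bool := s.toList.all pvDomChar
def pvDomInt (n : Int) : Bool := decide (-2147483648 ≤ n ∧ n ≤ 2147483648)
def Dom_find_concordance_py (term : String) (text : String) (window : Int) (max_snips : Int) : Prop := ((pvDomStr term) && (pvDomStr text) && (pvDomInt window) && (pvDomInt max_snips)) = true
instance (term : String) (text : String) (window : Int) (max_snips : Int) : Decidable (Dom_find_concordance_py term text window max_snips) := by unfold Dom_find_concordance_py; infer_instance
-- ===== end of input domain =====

-- B decomposes A's single snippet-building while-loop into two stages: a recursive
-- collection of the occurrence start indices, then a map building each snippet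
-- (objective: idiomatic).

-- ===== PORT A =====
-- A's while-loop: each iteration appends exactly one snippet, so the fuel
-- (max_snips - len(out)).toNat counts the remaining iterations exactly;
-- the loop body is transliterated step for step.
def pvALoopA (low needle t text : List Char) (window : Int) :
    Nat → Int → List (List Char) → List (List Char)
  | 0, _, out => out
  | k+1, start, out =>
      let idx := PySem.Chars.findFrom low needle start
      if idx < 0 then out
      else
        let a := max 0 (idx - window)
        let b := min ((text.length : Int)) (idx + (t.length : Int) + window)
        let snip := PySem.Chars.strip (PySem.Chars.replace (PySem.List.slice text (some a) (some b)) ['\n'] [' '])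
        pvALoopA low needle t text window k (idx + (t.length : Int)) (out ++ [snip])

def find_concordance_py (term : String) (text : String) (window : Int) (max_snips : Int) : List String :=
  let t := PySem.Chars.strip term.toList
  if t = [] ∨ text.toList = [] then []
  else
    let low := PySem.Chars.lower text.toList
    let needle := PySem.Chars.lower t
    (pvALoopA low needle t text.toList window max_snips.toNat 0 []).map String.mk

-- ===== PORT B =====
-- Source B's recursive helper occs(start, remaining): `remaining <= 0` is the base
-- case, so the Nat fuel is remaining.toNat; returns occurrence start indices only.
def pvOccsB (low needle : List Char) : Nat → Int → List Int
  | 0, _ => []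
  | k+1, start =>
      let i := PySem.Chars.findFrom low needle start
      if i < 0 then []
      else i :: pvOccsB low needle k (i + (needle.length : Int))

-- Source B's final list comprehension over occs(0, max_snips).
def find_concordance_py_alt (term : String) (text : String) (window : Int) (max_snips : Int) : List String :=
  let t := PySem.Chars.strip term.toList
  if t = [] ∨ text.toList = [] then []
  else
    let low := PySem.Chars.lower text.toList
    let needle := PySem.Chars.lower t
    (pvOccsB low needle max_snips.toNat 0).map (fun i =>
      String.mk (PySem.Chars.strip (PySem.Chars.replace
        (PySem.List.slice text.toList (some (max 0 (i - window)))
          (some (min ((text.toList.length : Int)) (i + (t.length : Int) + window)))) ['\n'] [' '])))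

-- ===== PRECONDITION & SPEC =====
def Spec_find_concordance_py (term : String) (text : String) (window : Int) (max_snips : Int) (out : List String) : Prop := out = find_concordance_py_alt term text window max_snips
instance (term : String) (text : String) (window : Int) (max_snips : Int) (out : List String) : Decidable (Spec_find_concordance_py term text window max_snips out) := by unfold Spec_find_concordance_py; infer_instance

-- ===== CLAIM (what is proved, stated in full; the proofs are below) =====
def Claim_equal_find_concordance_py : Prop := ∀ (term : String) (text : String) (window : Int) (max_snips : Int), Dom_find_concordance_py term text window max_snips → Spec_find_concordance_py term text window max_snips (find_concordance_py term text window max_snips)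

-- ===== LEMMAS AND PROOFS =====

-- A's loop equals out ++ the snippets of the indices B collects, for any start:
-- both sides call findFrom with the same start and advance it by the same amount
-- (t and needle have the same length, lowering being length-preserving).
lemma pvALoop_eq_occs (low needle t text : List Char) (window : Int)
    (hlen : (t.length : Int) = (needle.length : Int)) :
    ∀ (k : Nat) (start : Int) (out : List (List Char)),
    pvALoopA low needle t text window k start out
      = out ++ (pvOccsB low needle k start).map (fun i =>
          PySem.Chars.strip (PySem.Chars.replace
            (PySem.List.slice text (some (max 0 (i - window)))
              (some (min ((text.length : Int)) (i + (t.length : Int) + window)))) ['\n'] [' '])) := by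
  intro k
  induction k with
  | zero => intro start out; simp [pvALoopA, pvOccsB]
  | succ k ih =>
    intro start out
    rw [pvALoopA]
    by_cases hf : PySem.Chars.findFrom low needle start < 0
    · simp [pvOccsB, hf]
    · rw [if_neg hf]
      simp only [pvOccsB, if_neg hf, List.map_cons]
      rw [ih, hlen]
      simp

-- ===== VERDICT (by name: the statement is the Claim_ definition above) =====
theorem find_concordance_py_spec : Claim_equal_find_concordance_py := by
  intro term text window max_snips _
  unfold Spec_find_concordance_py find_concordance_py find_concordance_py_alt
  by_cases h1 : PySem.Chars.strip term.toList = []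
  · simp [h1]
  by_cases h2 : text.toList = []
  · simp [h1, h2]
  · rw [if_neg (by tauto), if_neg (by tauto)]
    dsimp only
    have hlen : ((PySem.Chars.strip term.toList).length : Int)
        = ((PySem.Chars.lower (PySem.Chars.strip term.toList)).length : Int) := by
      simp [PySem.Chars.lower]
    rw [pvALoop_eq_occs (PySem.Chars.lower text.toList)
      (PySem.Chars.lower (PySem.Chars.strip term.toList))
      (PySem.Chars.strip term.toList) text.toList window hlen max_snips.toNat 0 []]
    simp [List.map_map, Function.comp]
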